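-- pv_equiv track=rewrite | github.com/kosoymiki/winlator-wine-proton-arm64ec-wcp | ci/winlator/forensic-runtime-conflict-contour.py | choose_baseline
-- ===== SOURCE A (Python) =====
-- def choose_baseline(rows: list[dict[str, str]], baseline_label: str) -> dict[str, str]:
--     alias_map = {
--         "steven104": "gamenative104",
--         "gamenative104": "steven104",
--     }
--     if baseline_label:
--         for row in rows:
--             if row["label"] == baseline_label:
--                 return row
--         alias = alias_map.get(baseline_label)
--         if alias:
--             for row in rows:
--                 if row["label"] == alias:
--                     return row
--     return rows[0]
-- ===== SOURCE B (Python) =====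
-- def choose_baseline(rows: list[dict[str, str]], baseline_label: str) -> dict[str, str]:
--     if not baseline_label:
--         return rows[0]
--     alias = {"steven104": "gamenative104", "gamenative104": "steven104"}.get(baseline_label)
--     alias_row = None
--     for row in rows:
--         label = row["label"]
--         if label == baseline_label:
--             return row
--         if alias is not None and alias_row is None and label == alias:
--             alias_row = row
--     return alias_row if alias_row is not None else rows[0]
-- ===== Notes on version B (the rewrite author's own statement) =====
-- stated objective: alternative
-- what changed: B scans the rows once, returning an exact match immediately and remembering the first alias match in an accumulator, instead of A's two sequential full scans.
import Mathlib
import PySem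

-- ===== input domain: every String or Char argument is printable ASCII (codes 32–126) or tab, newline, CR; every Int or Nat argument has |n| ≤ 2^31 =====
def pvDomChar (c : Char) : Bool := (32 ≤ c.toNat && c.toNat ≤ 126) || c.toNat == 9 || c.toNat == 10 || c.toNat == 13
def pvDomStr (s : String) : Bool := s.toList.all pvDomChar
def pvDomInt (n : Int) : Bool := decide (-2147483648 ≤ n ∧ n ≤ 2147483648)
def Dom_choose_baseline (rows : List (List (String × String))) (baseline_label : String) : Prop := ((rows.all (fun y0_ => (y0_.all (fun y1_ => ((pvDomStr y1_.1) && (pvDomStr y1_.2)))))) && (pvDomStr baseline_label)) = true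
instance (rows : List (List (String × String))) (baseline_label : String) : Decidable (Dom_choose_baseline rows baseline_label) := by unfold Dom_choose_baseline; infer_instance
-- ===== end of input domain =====

-- B replaces A's two sequential scans over rows by one pass that returns an exact match
-- immediately and remembers the first alias match in an accumulator (objective: alternative).


-- ===== PORT A =====
-- row["label"] on a dict-as-assoc-list: first pair with key "label" (none = KeyError,
-- excluded by Pre_).
def pvRowLabel (r : List (String × String)) : Option String :=
  (r.find? (fun p => p.1 == "label")).map (·.2)

-- the alias_map literal of A (also used by B)
def pvAliasMap : List (String × String) :=
  [("steven104", "gamenative104"), ("gamenative104", "steven104")]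

-- alias_map.get(k): first-match lookup in the assoc list
def pvMapGet (d : List (String × String)) (k : String) : Option String :=
  (d.find? (fun p => p.1 == k)).map (·.2)

-- 'for row in rows: if row["label"] == target: return row' (A has this loop twice).
-- A KeyError row (pvRowLabel = none) ends the loop with none; such inputs are outside Pre_.
def pvFindLabel (rows : List (List (String × String))) (target : String) :
    Option (List (String × String)) :=
  match rows with
  | [] => none
  | r :: rs =>
    match pvRowLabel r with
    | none => none
    | some l => if l = target then some r else pvFindLabel rs target

def choose_baseline (rows : List (List (String × String))) (baseline_label : String) : List (String × String) :=
  if baseline_label ≠ "" then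
    match pvFindLabel rows baseline_label with
    | some r => r
    | none =>
      match pvMapGet pvAliasMap baseline_label with
      | some al_ =>
        if al_ ≠ "" then
          match pvFindLabel rows al_ with
          | some r => r
          | none => rows.headD []   -- rows[0]; IndexError (rows = []) excluded by Pre_
        else rows.headD []
      | none => rows.headD []
  else rows.headD []

-- ===== PORT B =====
-- B's single loop: return on exact match, remember the first alias match in aliasRow;
-- at the end of the loop Source B returns alias_row if set (the 'match … | [] => aliasRow').
-- A KeyError row (pvRowLabel = none) ends the loop with aliasRow; outside Pre_.
def pvAltLoop (rows : List (List (String × String))) (bl : String)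
    (al_ : Option String) (aliasRow : Option (List (String × String))) :
    Option (List (String × String)) :=
  match rows with
  | [] => aliasRow
  | r :: rs =>
    match pvRowLabel r with
    | none => aliasRow
    | some l =>
      if l = bl then some r
      else
        match al_ with
        | some a =>
          if aliasRow = none ∧ l = a then pvAltLoop rs bl al_ (some r)
          else pvAltLoop rs bl al_ aliasRow
        | none => pvAltLoop rs bl al_ aliasRow

def choose_baseline_alt (rows : List (List (String × String))) (baseline_label : String) : List (String × String) :=
  if baseline_label = "" then rows.headD []
  else
    match pvAltLoop rows baseline_label (pvMapGet pvAliasMap baseline_label) none with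
    | some r => r
    | none => rows.headD []

-- ===== PRECONDITION & SPEC =====
-- Pre_ excludes exactly the inputs on which A raises: rows = [] when the fallback rows[0]
-- is reached (IndexError), and a row without a "label" key reached by the first loop
-- before an exact match (KeyError).
def Pre_choose_baseline (rows : List (List (String × String))) (baseline_label : String) : Prop :=
  rows ≠ [] ∧
    (baseline_label = "" ∨
      (∃ r ∈ rows.takeWhile (fun r => (pvRowLabel r).isSome),
          pvRowLabel r = some baseline_label) ∨
      (∀ r ∈ rows, (pvRowLabel r).isSome))
instance (rows : List (List (String × String))) (baseline_label : String) : Decidable (Pre_choose_baseline rows baseline_label) := by unfold Pre_choose_baseline; infer_instance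

def pvWitness_choose_baseline : (List (List (String × String))) × String :=
  ([[("label", "steven104")], [("label", "x")]], "gamenative104")

def Spec_choose_baseline (rows : List (List (String × String))) (baseline_label : String) (out : List (String × String)) : Prop := out = choose_baseline_alt rows baseline_label
instance (rows : List (List (String × String))) (baseline_label : String) (out : List (String × String)) : Decidable (Spec_choose_baseline rows baseline_label out) := by unfold Spec_choose_baseline; infer_instance

-- ===== CLAIM (what is proved, stated in full; the proofs are below) =====
def Claim_equal_choose_baseline : Prop := ∀ (rows : List (List (String × String))) (baseline_label : String), Dom_choose_baseline rows baseline_label → Pre_choose_baseline rows baseline_label → Spec_choose_baseline rows baseline_label (choose_baseline rows baseline_label)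

-- ===== LEMMAS AND PROOFS =====

-- Any value the alias map yields is a nonempty string.
lemma aliasMap_ne_empty (bl a : String) (h : pvMapGet pvAliasMap bl = some a) : a ≠ "" := by
  unfold pvMapGet pvAliasMap at h
  simp only [List.find?] at h
  split at h
  · cases h; decide
  · split at h
    · cases h; decide
    · simp_all

-- When every row has a "label", the single pass equals "first loop, then stored/second loop".
lemma altLoop_all_labeled (rows : List (List (String × String))) (bl : String)
    (al_ : Option String) (acc : Option (List (String × String)))
    (h : ∀ r ∈ rows, (pvRowLabel r).isSome) :
    pvAltLoop rows bl al_ acc =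
      (pvFindLabel rows bl).or (acc.or (al_.bind (fun a => pvFindLabel rows a))) := by
  induction rows generalizing acc with
  | nil => cases al_ <;> simp [pvAltLoop, pvFindLabel]
  | cons r rs ih =>
    have hr : (pvRowLabel r).isSome := h r (by simp)
    obtain ⟨l, hl⟩ := Option.isSome_iff_exists.mp hr
    have hrs : ∀ x ∈ rs, (pvRowLabel x).isSome := fun x hx => h x (by simp [hx])
    by_cases hbl : l = bl
    · simp [pvAltLoop, pvFindLabel, hl, hbl]
    · cases al_ with
      | none => simp [pvAltLoop, pvFindLabel, hl, hbl, ih _ hrs]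
      | some a =>
        by_cases ha : acc = none ∧ l = a
        · obtain ⟨hacc, hla⟩ := ha
          subst hacc hla
          simp [pvAltLoop, pvFindLabel, hl, hbl, ih _ hrs]
        · have : pvAltLoop (r :: rs) bl (some a) acc = pvAltLoop rs bl (some a) acc := by
            simp only [pvAltLoop, hl]
            rw [if_neg hbl, if_neg ha]
          rw [this, ih _ hrs]
          rcases acc with _ | ar
          · have hla : ¬ l = a := fun hc => ha ⟨rfl, hc⟩
            simp [pvFindLabel, hl, hbl, hla]
          · simp [pvFindLabel, hl, hbl]

-- If an exact match occurs within the labeled prefix, both loops return that first match.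
lemma altLoop_match_prefix (rows : List (List (String × String))) (bl : String)
    (al_ : Option String) (acc : Option (List (String × String)))
    (h : ∃ r ∈ rows.takeWhile (fun r => (pvRowLabel r).isSome), pvRowLabel r = some bl) :
    pvAltLoop rows bl al_ acc = pvFindLabel rows bl ∧ (pvFindLabel rows bl).isSome := by
  induction rows generalizing acc with
  | nil => simp at h
  | cons r rs ih =>
    by_cases hr : (pvRowLabel r).isSome
    · obtain ⟨l, hl⟩ := Option.isSome_iff_exists.mp hr
      by_cases hbl : l = bl
      · constructor <;> simp [pvAltLoop, pvFindLabel, hl, hbl]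
      · have h' : ∃ x ∈ rs.takeWhile (fun r => (pvRowLabel r).isSome), pvRowLabel x = some bl := by
          rw [List.takeWhile_cons_of_pos (by simpa using hr)] at h
          rcases h with ⟨x, hx, hxl⟩
          rcases List.mem_cons.mp hx with h1 | h1
          · subst h1; rw [hl] at hxl; exact absurd (Option.some_inj.mp hxl) hbl
          · exact ⟨x, h1, hxl⟩
        cases al_ with
        | none =>
          refine ⟨?_, by simpa [pvFindLabel, hl, hbl] using (ih acc h').2⟩
          simp [pvAltLoop, pvFindLabel, hl, hbl, (ih acc h').1]
        | some a =>
          by_cases ha : acc = none ∧ l = a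
          · refine ⟨?_, by simpa [pvFindLabel, hl, hbl] using (ih (some r) h').2⟩
            obtain ⟨hacc, hla⟩ := ha; subst hacc hla
            simp [pvAltLoop, pvFindLabel, hl, hbl, (ih (some r) h').1]
          · refine ⟨?_, by simpa [pvFindLabel, hl, hbl] using (ih acc h').2⟩
            have : pvAltLoop (r :: rs) bl (some a) acc = pvAltLoop rs bl (some a) acc := by
              simp only [pvAltLoop, hl]
              rw [if_neg hbl, if_neg ha]
            simp [this, pvFindLabel, hl, hbl, (ih acc h').1]
    · rw [List.takeWhile_cons_of_neg (by simpa using hr)] at h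
      simp at h

-- ===== VERDICT (by name: the statement is the Claim_ definition above) =====
theorem choose_baseline_spec : Claim_equal_choose_baseline := by
  intro rows bl _hdom hpre
  unfold Spec_choose_baseline
  obtain ⟨hne, hcase⟩ := hpre
  by_cases hbl : bl = ""
  · subst hbl; simp [choose_baseline, choose_baseline_alt]
  · rcases hcase with h0 | hmatch | hall
    · exact absurd h0 hbl
    · obtain ⟨halt, hsome⟩ := altLoop_match_prefix rows bl (pvMapGet pvAliasMap bl) none hmatch
      obtain ⟨m, hm⟩ := Option.isSome_iff_exists.mp hsome
      simp [choose_baseline, choose_baseline_alt, hbl, hm, halt]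
    · simp only [choose_baseline, choose_baseline_alt, if_neg hbl,
        if_pos (show bl ≠ "" from hbl)]
      rw [altLoop_all_labeled rows bl _ none hall]
      cases hf : pvFindLabel rows bl with
      | some m => simp [hf]
      | none =>
        cases hg : pvMapGet pvAliasMap bl with
        | none => simp
        | some a =>
          have hane := aliasMap_ne_empty bl a hg
          cases hfa : pvFindLabel rows a with
          | some m => simp [hfa, hane]
          | none => simp [hfa, hane]
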